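-- pv_equiv track=rewrite | github.com/Vishakha6/cell-eval-plugin | src/evaluate.py | find_over_under
-- ===== SOURCE A (Python) =====
-- def find_over_under(dict_result, data):
-- 	"""Find number of over and under segmented cells.
--
-- 	Args:
-- 		dict_result: dictionary containing predicted labels for each ground truth cell.
-- 		data: data to be saved to csv file.
--
-- 	Returns:
-- 		data: updated csv data with "over" or "under" label assigned to over and under segmented cells.
-- 		over_segmented: number of over segmented cells.
-- 		under_segmented: number of under segmented cells.
-- 	"""
-- 	over_segmented = 0; under_segmented = 0
-- 	labels = {}
-- 	for key in dict_result:
-- 		value = dict_result[key]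
-- 		if len(value) == 1:
-- 			labels[key] = value[0]
-- 		if len(value) > 1:
-- 			over_segmented+=1
-- 			data[key].append("over")
--
-- 	dict_new = {}
-- 	for key, value in labels.items():
-- 		dict_new.setdefault(value, set()).add(key)
-- 	res = filter(lambda x: len(x)>1, dict_new.values())
-- 	for i in list(res):
-- 		for ind in i:
-- 			data[ind].append("under")
-- 			under_segmented+=1
--
-- 	return data, over_segmented, under_segmented
-- ===== SOURCE B (Python) =====
-- def find_over_under(dict_result, data):
-- 	"""Same result as A, by a different algorithm: duplicate singleton labels are
-- 	detected by sorting the (label, key) pairs and scanning consecutive runs,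
-- 	instead of A's value->set-of-keys dict inversion.  Mutates data in place, like A."""
-- 	over_segmented = 0
-- 	singles = []
-- 	for key, value in dict_result.items():
-- 		if len(value) > 1:
-- 			over_segmented += 1
-- 			data[key].append("over")
-- 		elif len(value) == 1:
-- 			singles.append((value[0], key))
--
-- 	singles.sort(key=lambda p: p[0])
--
-- 	under_segmented = 0
-- 	run_v = None
-- 	run = []
-- 	for v, key in singles:
-- 		if run and run_v == v:
-- 			run.append(key)
-- 		else:
-- 			if len(run) > 1:
-- 				for k in run:
-- 					data[k].append("under")
-- 				under_segmented += len(run)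
-- 			run_v = v
-- 			run = [key]
-- 	if len(run) > 1:
-- 		for k in run:
-- 			data[k].append("under")
-- 		under_segmented += len(run)
--
-- 	return data, over_segmented, under_segmented
-- ===== Notes on version B (the rewrite author's own statement) =====
-- stated objective: alternative
-- what changed: A detects shared singleton labels by inverting labels into a dict of value->set-of-keys and walking the filtered groups with nested loops; B instead sorts the (label, key) singleton pairs and scans consecutive runs with a run accumulator, flushing each run of length > 1 -- sort-then-scan duplicate detection instead of hash grouping. Pre_ excludes association lists with duplicate keys (not representable as a Python dict) and inputs where a key that receives an 'over'/'under' append is missing from data, on which both Pythons raise KeyError.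
import Mathlib
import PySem

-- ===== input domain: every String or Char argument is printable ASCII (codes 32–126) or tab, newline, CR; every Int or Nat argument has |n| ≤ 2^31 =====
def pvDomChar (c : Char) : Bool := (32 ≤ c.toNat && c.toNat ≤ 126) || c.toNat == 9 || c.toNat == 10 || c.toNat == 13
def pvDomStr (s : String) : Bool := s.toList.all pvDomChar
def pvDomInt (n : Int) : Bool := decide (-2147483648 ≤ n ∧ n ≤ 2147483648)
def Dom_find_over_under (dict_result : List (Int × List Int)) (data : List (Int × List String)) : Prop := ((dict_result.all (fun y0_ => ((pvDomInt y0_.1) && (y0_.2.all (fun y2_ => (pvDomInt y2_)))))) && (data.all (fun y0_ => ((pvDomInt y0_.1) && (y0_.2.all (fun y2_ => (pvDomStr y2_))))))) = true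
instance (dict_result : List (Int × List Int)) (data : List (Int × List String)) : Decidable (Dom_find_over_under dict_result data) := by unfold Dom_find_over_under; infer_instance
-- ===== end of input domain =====

-- B detects shared singleton labels by sorting the (label, key) pairs and scanning consecutive
-- runs, instead of A's value→set-of-keys dict inversion with nested loops (objective:
-- alternative).  Both Pythons mutate `data` in place identically; the equivalence proved here
-- is about the returned triple.

-- ===== PORT A =====
-- A's first loop, one step: 'if len(value)==1: labels[key]=value[0]' then 'if len(value)>1: over+=1; data[key].append("over")'.
-- value[0] is ported as pyGetD value 0 0, exact under the guard len(value)==1.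
-- State = (labels, data-as-dict, over_segmented).
def fouStepA (st : PySem.Dict Int Int × PySem.Dict Int (List String) × Int) (p : Int × List Int) :
    PySem.Dict Int Int × PySem.Dict Int (List String) × Int :=
  let st1 := if p.2.length = 1 then (st.1.insert p.1 (PySem.List.pyGetD p.2 0 0), st.2.1, st.2.2) else st
  if p.2.length > 1 then (st1.1, st1.2.1.modify p.1 [] (fun l => l ++ ["over"]), st1.2.2 + 1) else st1

-- 'for key in dict_result' iterates the dict's keys: faithful to the assoc-list input under
-- Pre_ (no duplicate keys).  'data[key].append(…)' is Dict.modify, exact under Pre_ (key present).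
-- 'dict_new.setdefault(value, set()).add(key)' is Dict.modify value [] (Set.add · key).
-- Iterating each set in A's last loop appends to pairwise-distinct keys of data, so the returned
-- value does not depend on Python's set-iteration order and folding the Set's list is faithful.
def find_over_under (dict_result : List (Int × List Int)) (data : List (Int × List String)) :
    (List (Int × List String)) × Int × Int :=
  let s1 := dict_result.foldl fouStepA (PySem.Dict.empty, PySem.Dict.mk data, (0 : Int))
  let labels := s1.1
  let dict_new : PySem.Dict Int (PySem.Set Int) :=
    labels.items.foldl (fun dn p => dn.modify p.2 [] (fun s => PySem.Set.add s p.1)) PySem.Dict.empty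
  let res := dict_new.values.filter (fun s => PySem.Set.len s > 1)
  let s2 := res.foldl
    (fun s grp => grp.foldl (fun s ind => (s.1.modify ind [] (fun l => l ++ ["under"]), s.2 + 1)) s)
    (s1.2.1, (0 : Int))
  (s2.1.items, s1.2.2, s2.2)

-- ===== PORT B =====
-- B's first loop, one step: 'if len(value) > 1: … elif len(value) == 1: singles.append((value[0], key))'.
-- State = (singles, data-as-dict, over_segmented).
def fouStepBalt (st : List (Int × Int) × PySem.Dict Int (List String) × Int) (p : Int × List Int) :
    List (Int × Int) × PySem.Dict Int (List String) × Int :=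
  if p.2.length > 1 then (st.1, st.2.1.modify p.1 [] (fun l => l ++ ["over"]), st.2.2 + 1)
  else if p.2.length = 1 then (st.1 ++ [(PySem.List.pyGetD p.2 0 0, p.1)], st.2.1, st.2.2)
  else st

-- Source B's flush: 'if len(run) > 1: for k in run: data[k].append("under"); under += len(run)'.
def flushRun (du : PySem.Dict Int (List String) × Int) (run : List Int) :
    PySem.Dict Int (List String) × Int :=
  if run.length > 1 then
    (run.foldl (fun d k => d.modify k [] (fun l => l ++ ["under"])) du.1, du.2 + (run.length : Int))
  else du

-- Source B's scan loop, one step: 'if run and run_v == v: run.append(key) else: <flush>; run_v, run = v, [key]'.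
-- State = ((data-as-dict, under_segmented), run_v as Option, run).
def scanStep (st : (PySem.Dict Int (List String) × Int) × Option Int × List Int) (p : Int × Int) :
    (PySem.Dict Int (List String) × Int) × Option Int × List Int :=
  if st.2.2 ≠ [] ∧ st.2.1 = some p.1 then (st.1, st.2.1, st.2.2 ++ [p.2])
  else (flushRun st.1 st.2.2, some p.1, [p.2])

-- 'singles.sort(key=lambda p: p[0])' is PySem.List.sorted (stable, key = first component).
def find_over_under_alt (dict_result : List (Int × List Int)) (data : List (Int × List String)) :
    (List (Int × List String)) × Int × Int :=
  let s1 := dict_result.foldl fouStepBalt ([], PySem.Dict.mk data, (0 : Int))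
  let singles := PySem.List.sorted s1.1 (fun p => p.1) false
  let s2 := singles.foldl scanStep ((s1.2.1, (0 : Int)), none, [])
  let fin := flushRun s2.1 s2.2.2
  (fin.1.items, s1.2.2, fin.2)

-- ===== PRECONDITION & SPEC =====
-- Pre_ excludes assoc lists with duplicate keys (not representable as a Python dict) and inputs
-- where a key that receives an 'over'/'under' append is missing from data (both Pythons raise
-- KeyError there).
def Pre_find_over_under (dict_result : List (Int × List Int)) (data : List (Int × List String)) : Prop :=
  (dict_result.map Prod.fst).Nodup ∧ (data.map Prod.fst).Nodup ∧
  ∀ p ∈ dict_result,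
    (p.2.length > 1 ∨ (p.2.length = 1 ∧
      1 < ((dict_result.filter (fun q => q.2.length = 1)).map
            (fun q => PySem.List.pyGetD q.2 0 0)).count (PySem.List.pyGetD p.2 0 0))) →
    p.1 ∈ data.map Prod.fst
instance (dict_result : List (Int × List Int)) (data : List (Int × List String)) : Decidable (Pre_find_over_under dict_result data) := by unfold Pre_find_over_under; infer_instance

def pvWitness_find_over_under : (List (Int × List Int)) × (List (Int × List String)) :=
  ([(0, [7]), (1, [7]), (2, [3, 4]), (3, [])], [(0, []), (1, ["x"]), (2, []), (5, [])])

def Spec_find_over_under (dict_result : List (Int × List Int)) (data : List (Int × List String)) (out : (List (Int × List String)) × Int × Int) : Prop := out = find_over_under_alt dict_result data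
instance (dict_result : List (Int × List Int)) (data : List (Int × List String)) (out : (List (Int × List String)) × Int × Int) : Decidable (Spec_find_over_under dict_result data out) := by unfold Spec_find_over_under; infer_instance

-- ===== CLAIM (what is proved, stated in full; the proofs are below) =====
def Claim_equal_find_over_under : Prop := ∀ (dict_result : List (Int × List Int)) (data : List (Int × List String)), Dom_find_over_under dict_result data → Pre_find_over_under dict_result data → Spec_find_over_under dict_result data (find_over_under dict_result data)

-- ===== LEMMAS AND PROOFS =====

-- component folds of the two first passes
def lstep (l : PySem.Dict Int Int) (p : Int × List Int) : PySem.Dict Int Int :=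
  if p.2.length = 1 then l.insert p.1 (PySem.List.pyGetD p.2 0 0) else l
def sstep (s : List (Int × Int)) (p : Int × List Int) : List (Int × Int) :=
  if p.2.length = 1 then s ++ [(PySem.List.pyGetD p.2 0 0, p.1)] else s
def dstep (d : PySem.Dict Int (List String)) (p : Int × List Int) : PySem.Dict Int (List String) :=
  if p.2.length > 1 then d.modify p.1 [] (fun l => l ++ ["over"]) else d
def ostep (o : Int) (p : Int × List Int) : Int := if p.2.length > 1 then o + 1 else o

theorem pass1A_split (dr : List (Int × List Int)) (l0 : PySem.Dict Int Int)
    (d0 : PySem.Dict Int (List String)) (o0 : Int) :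
    dr.foldl fouStepA (l0, d0, o0) = (dr.foldl lstep l0, dr.foldl dstep d0, dr.foldl ostep o0) := by
  have h : ∀ (s : PySem.Dict Int Int × PySem.Dict Int (List String) × Int) p,
      fouStepA s p = (lstep s.1 p, dstep s.2.1 p, ostep s.2.2 p) := by
    intro st p
    unfold fouStepA lstep dstep ostep
    by_cases h1 : p.2.length = 1 <;> by_cases h2 : p.2.length > 1 <;> simp [h1, h2]
  induction dr generalizing l0 d0 o0 with
  | nil => rfl
  | cons p dr ih => rw [List.foldl_cons, h, ih]; rfl

theorem pass1B_split (dr : List (Int × List Int)) (s0 : List (Int × Int))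
    (d0 : PySem.Dict Int (List String)) (o0 : Int) :
    dr.foldl fouStepBalt (s0, d0, o0) = (dr.foldl sstep s0, dr.foldl dstep d0, dr.foldl ostep o0) := by
  have h : ∀ (s : List (Int × Int) × PySem.Dict Int (List String) × Int) p,
      fouStepBalt s p = (sstep s.1 p, dstep s.2.1 p, ostep s.2.2 p) := by
    intro st p
    unfold fouStepBalt sstep dstep ostep
    by_cases h1 : p.2.length = 1 <;> by_cases h2 : p.2.length > 1 <;> simp [h1, h2]
  induction dr generalizing s0 d0 o0 with
  | nil => rfl
  | cons p dr ih => rw [List.foldl_cons, h, ih]; rfl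

-- a guarded fold is the plain fold over the filtered, projected list
theorem foldl_if_filter {β κ σ : Type} (c : β → Prop) [DecidablePred c] (key : β → κ)
    (f : σ → κ → σ) (L : List β) (s : σ) :
    L.foldl (fun s p => if c p then f s (key p) else s) s = ((L.filter (fun p => c p)).map key).foldl f s := by
  induction L generalizing s with
  | nil => rfl
  | cons p L ih =>
      by_cases h : c p <;> simp [h, ih]

-- in a list with distinct keys, the key determines the value
theorem snd_eq_of_nodup_fst {α β : Type} {L : List (α × β)} (h : (L.map Prod.fst).Nodup)
    {k : α} {v v' : β} (h1 : (k, v) ∈ L) (h2 : (k, v') ∈ L) : v = v' := by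
  induction L with
  | nil => cases h1
  | cons q L ih =>
      simp only [List.map_cons, List.nodup_cons] at h
      rcases List.mem_cons.1 h1 with e1 | m1 <;> rcases List.mem_cons.1 h2 with e2 | m2
      · rw [← e1] at e2; exact (Prod.mk.injEq _ _ _ _ ▸ e2.symm).2
      · exact absurd (List.mem_map.2 ⟨_, m2, by rw [← e1]⟩) h.1
      · exact absurd (List.mem_map.2 ⟨_, m1, by rw [← e2]⟩) h.1
      · exact ih h.2 m1 m2

-- labels built by A's first pass, explicitly: the singleton entries of dict_result
def singEntries (dr : List (Int × List Int)) : List (Int × Int) :=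
  (dr.filter (fun p => p.2.length = 1)).map (fun p => (p.1, PySem.List.pyGetD p.2 0 0))

theorem labels_items_aux (dr : List (Int × List Int)) :
    ∀ (l0 : PySem.Dict Int Int), (l0.keys ++ dr.map Prod.fst).Nodup →
    (dr.foldl lstep l0).items = l0.items ++ singEntries dr := by
  induction dr with
  | nil => intro l0 _; simp [singEntries]
  | cons p dr ih =>
      intro l0 h
      rw [List.foldl_cons]
      by_cases h1 : p.2.length = 1
      · have hfst : p.1 ∉ l0.keys := by
          intro hk
          exact (List.disjoint_of_nodup_append h) hk (by simp)
        have hcon : l0.contains p.1 = false := by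
          rw [PySem.Dict.contains_eq_decide_mem_keys]
          simp [hfst]
        have hl : lstep l0 p = l0.insert p.1 (PySem.List.pyGetD p.2 0 0) := by simp [lstep, h1]
        rw [hl, ih _ (by
          rw [PySem.Dict.keys_insert_of_not_contains _ _ hcon]
          simp only [List.map_cons] at h
          simpa [List.append_assoc] using h)]
        rw [PySem.Dict.items_insert_of_not_contains _ _ hcon]
        simp [singEntries, h1]
      · have hl : lstep l0 p = l0 := by simp [lstep, h1]
        rw [hl, ih _ (by
          simp only [List.map_cons] at h
          exact ((List.sublist_cons_self p.1 (dr.map Prod.fst)).append_left l0.keys).nodup h)]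
        simp [singEntries, h1]

-- singles built by B's first pass: the same entries, swapped to (value, key)
theorem singles_fold (dr : List (Int × List Int)) :
    ∀ (s0 : List (Int × Int)),
    dr.foldl sstep s0 = s0 ++ (singEntries dr).map (fun q => (q.2, q.1)) := by
  induction dr with
  | nil => intro s0; simp [singEntries]
  | cons p dr ih =>
      intro s0
      rw [List.foldl_cons]
      by_cases h1 : p.2.length = 1 <;> simp [sstep, h1, ih, singEntries]

-- A's grouping fold: dict_new[v] collects, in order, the keys whose label is v
def gstep (dn : PySem.Dict Int (PySem.Set Int)) (p : Int × Int) : PySem.Dict Int (PySem.Set Int) :=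
  dn.modify p.2 [] (fun s => PySem.Set.add s p.1)

theorem groups_getD_aux (L : List (Int × Int)) :
    ∀ (d : PySem.Dict Int (PySem.Set Int)) (ks0 : List Int),
    (∀ v k, k ∈ d.getD v [] → k ∈ ks0) → (ks0 ++ L.map Prod.fst).Nodup →
    ∀ v, (L.foldl gstep d).getD v [] = d.getD v [] ++ (L.filter (fun p => p.2 = v)).map Prod.fst := by
  induction L with
  | nil => intro d ks0 _ _ v; simp
  | cons p L ih =>
      intro d ks0 hinv h v
      have hp1 : p.1 ∉ ks0 := by
        intro hk
        exact (List.disjoint_of_nodup_append h) hk (by simp)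
      have hadd : PySem.Set.add (d.getD p.2 []) p.1 = d.getD p.2 [] ++ [p.1] :=
        PySem.Set.add_of_not_mem (fun hm => hp1 (hinv _ _ hm))
      have hstep : ∀ w, (gstep d p).getD w [] =
          if w = p.2 then d.getD p.2 [] ++ [p.1] else d.getD w [] := by
        intro w
        rw [gstep, PySem.Dict.getD_modify, hadd]
      rw [List.foldl_cons,
        ih (gstep d p) (ks0 ++ [p.1])
          (by
            intro w k hk
            rw [hstep w] at hk
            by_cases hw : w = p.2
            · rw [if_pos hw] at hk
              rcases List.mem_append.1 hk with hk | hk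
              · exact List.mem_append.2 (Or.inl (hinv _ _ hk))
              · simp at hk; simp [hk]
            · rw [if_neg hw] at hk
              exact List.mem_append.2 (Or.inl (hinv _ _ hk)))
          (by simp only [List.map_cons] at h; simpa [List.append_assoc] using h) v,
        hstep v]
      by_cases hw : v = p.2
      · subst hw
        simp
      · rw [if_neg hw, List.filter_cons_of_neg (by simpa using fun h : p.2 = v => hw h.symm)]

theorem groups_getD (L : List (Int × Int)) (h : (L.map Prod.fst).Nodup) (v : Int) :
    (L.foldl gstep PySem.Dict.empty).getD v [] = (L.filter (fun p => p.2 = v)).map Prod.fst := by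
  have := groups_getD_aux L PySem.Dict.empty []
    (by intro v k hk; simp [PySem.Dict.getD_empty] at hk) (by simpa using h) v
  simpa [PySem.Dict.getD_empty] using this

theorem groups_keys (L : List (Int × Int)) :
    (L.foldl gstep PySem.Dict.empty).keys = PySem.Set.ofList (L.map Prod.snd) := by
  have := PySem.Dict.keys_foldl_modify_key L Prod.snd ([] : PySem.Set Int)
    (fun _ p => fun s => PySem.Set.add s p.1) PySem.Dict.empty
  simpa [gstep, PySem.Dict.keys_empty, PySem.Set.update_nil_left] using this

-- updating a set with elements it already has changes nothing
theorem update_self (s : PySem.Set Int) (xs : List Int) (h : ∀ x ∈ xs, x ∈ s) :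
    PySem.Set.update s xs = s := by
  rw [PySem.Set.update_eq_append_filter]
  have : List.filter (fun y => !s.contains y) (PySem.Set.ofList xs) = [] := by
    rw [List.filter_eq_nil_iff]
    intro y hy
    have : y ∈ s := h y ((PySem.Set.mem_ofList _ _).1 hy)
    simp [PySem.Set.contains_eq_listContains, this]
  rw [this, List.append_nil]

-- the "under"-marking fold
def mark (d : PySem.Dict Int (List String)) (ks : List Int) : PySem.Dict Int (List String) :=
  ks.foldl (fun d k => d.modify k [] (fun l => l ++ ["under"])) d

theorem mark_append (d : PySem.Dict Int (List String)) (a b : List Int) :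
    mark d (a ++ b) = mark (mark d a) b := List.foldl_append ..

theorem filter_map_under (ks : List Int) (c : Int) :
    ((ks.map (fun k => (k, ("under" : String)))).filter (fun p => p.1 == c)).map Prod.snd
      = List.replicate (ks.count c) "under" := by
  induction ks with
  | nil => rfl
  | cons k ks ih =>
      by_cases h : k = c <;> simp [h, ih, List.replicate_succ]

theorem mark_getD (d : PySem.Dict Int (List String)) (ks : List Int) (c : Int) :
    (mark d ks).getD c [] = d.getD c [] ++ List.replicate (ks.count c) "under" := by
  have hm : mark d ks =
      (ks.map (fun k => (k, ("under" : String)))).foldl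
        (fun d p => d.modify p.1 [] (fun l => l ++ [p.2])) d := by
    rw [List.foldl_map]
    rfl
  rw [hm, PySem.Dict.getD_foldl_modify_append, filter_map_under]

theorem mark_keys (d : PySem.Dict Int (List String)) (ks : List Int)
    (h : ∀ k ∈ ks, k ∈ d.keys) : (mark d ks).keys = d.keys := by
  have := PySem.Dict.keys_foldl_modify ks ([] : List String)
    (fun _ _ => fun l => l ++ ["under"]) d
  rw [mark, this, update_self _ _ h]

theorem mark_eq_of_perm (d : PySem.Dict Int (List String)) {ks ks' : List Int}
    (hp : ks.Perm ks') (hsub : ∀ k ∈ ks, k ∈ d.keys) (hnd : d.keys.Nodup) :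
    mark d ks = mark d ks' := by
  have hsub' : ∀ k ∈ ks', k ∈ d.keys := fun k hk => hsub k (hp.mem_iff.2 hk)
  have hk1 := mark_keys d ks hsub
  have hk2 := mark_keys d ks' hsub'
  apply PySem.Dict.ext
  rw [PySem.Dict.items_eq_map_keys _ (hk1 ▸ hnd) ([] : List String),
      PySem.Dict.items_eq_map_keys _ (hk2 ▸ hnd) ([] : List String), hk1, hk2]
  apply List.map_congr_left
  intro k _
  rw [mark_getD, mark_getD, hp.count_eq]

theorem foldl_add_one (l : List Int) (u : Int) :
    l.foldl (fun u _ => u + 1) u = u + l.length := by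
  induction l generalizing u with
  | nil => simp
  | cons k l ih => simp [ih]; omega

-- the keys of the group of v, in order
def grpKeys (L : List (Int × Int)) (v : Int) : List Int :=
  (L.filter (fun p => p.2 = v)).map Prod.fst

theorem grpKeys_length (L : List (Int × Int)) (v : Int) :
    (grpKeys L v).length = (L.map Prod.snd).count v := by
  rw [grpKeys, List.length_map, ← List.countP_eq_length_filter,
      List.count_eq_countP, List.countP_map]
  apply List.countP_congr
  intro p _
  simp

theorem mem_grpKeys (L : List (Int × Int)) (v k : Int) : k ∈ grpKeys L v ↔ (k, v) ∈ L := by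
  constructor
  · intro hk
    rcases List.mem_map.1 hk with ⟨p, hp, rfl⟩
    rcases List.mem_filter.1 hp with ⟨hpL, hpv⟩
    have : p.2 = v := by simpa using hpv
    exact (Prod.mk.eta (p := p)) ▸ (this ▸ hpL)
  · intro hk
    exact List.mem_map.2 ⟨(k, v), List.mem_filter.2 ⟨hk, by simp⟩, rfl⟩

-- A's flattened filtered groups are, up to order, the keys whose value occurs more than once
theorem KA_perm_KB (L : List (Int × Int)) (hK : (L.map Prod.fst).Nodup) :
    (((L.foldl gstep PySem.Dict.empty).values.filter (fun s => PySem.Set.len s > 1)).flatten).Perm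
      ((L.filter (fun p => 1 < (L.map Prod.snd).count p.2)).map Prod.fst) := by
  have knodup : (L.foldl gstep PySem.Dict.empty).keys.Nodup := by
    rw [groups_keys]; exact PySem.Set.nodup_ofList _
  have hvals : (L.foldl gstep PySem.Dict.empty).values
      = (PySem.Set.ofList (L.map Prod.snd)).map (grpKeys L) := by
    rw [PySem.Dict.values_eq_map_keys _ knodup ([] : PySem.Set Int), groups_keys]
    exact List.map_congr_left (fun v _ => groups_getD L hK v)
  have hnodupg : ∀ v, (grpKeys L v).Nodup :=
    fun v => (List.filter_sublist.map Prod.fst).nodup hK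
  have hlenA : ∀ (t : PySem.Set Int), (PySem.Set.len t > 1) ↔ 1 < t.length := by
    intro t; rw [PySem.Set.len]; omega
  have hKA : (((L.foldl gstep PySem.Dict.empty).values.filter
      (fun s => PySem.Set.len s > 1)).flatten).Nodup := by
    rw [List.nodup_flatten]
    constructor
    · intro t ht
      have := (List.mem_filter.1 ht).1
      rw [hvals] at this
      rcases List.mem_map.1 this with ⟨v, _, rfl⟩
      exact hnodupg v
    · apply List.Pairwise.sublist List.filter_sublist
      rw [hvals]
      apply List.pairwise_map.2
      apply List.Pairwise.imp _ (PySem.Set.nodup_ofList (L.map Prod.snd))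
      intro v v' hne k hk hk'
      exact hne (snd_eq_of_nodup_fst hK ((mem_grpKeys L v k).1 hk) ((mem_grpKeys L v' k).1 hk'))
  have hKB : ((L.filter (fun p => 1 < (L.map Prod.snd).count p.2)).map Prod.fst).Nodup :=
    (List.filter_sublist.map Prod.fst).nodup hK
  rw [List.perm_ext_iff_of_nodup hKA hKB]
  intro k
  rw [List.mem_flatten]
  constructor
  · rintro ⟨t, ht, hkt⟩
    rcases List.mem_filter.1 ht with ⟨htv, htlen⟩
    rw [hvals] at htv
    rcases List.mem_map.1 htv with ⟨v, _, rfl⟩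
    have hkv : (k, v) ∈ L := (mem_grpKeys L v k).1 hkt
    have hcnt : 1 < (L.map Prod.snd).count v := by
      rw [← grpKeys_length]
      exact (hlenA _).1 (by simpa using htlen)
    exact List.mem_map.2 ⟨(k, v), List.mem_filter.2 ⟨hkv, by simpa using hcnt⟩, rfl⟩
  · intro hk
    rcases List.mem_map.1 hk with ⟨p, hp, rfl⟩
    rcases List.mem_filter.1 hp with ⟨hpL, hpc⟩
    have hcnt : 1 < (L.map Prod.snd).count p.2 := by simpa using hpc
    refine ⟨grpKeys L p.2, List.mem_filter.2 ⟨?_, ?_⟩, (mem_grpKeys L p.2 p.1).2 (by simpa using hpL)⟩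
    · rw [hvals]
      exact List.mem_map.2 ⟨p.2, (PySem.Set.mem_ofList _ _).2 (List.mem_map.2 ⟨p, hpL, rfl⟩), rfl⟩
    · simpa using (hlenA _).2 (by rw [grpKeys_length]; exact hcnt)

-- A's second phase is a marking fold plus a count
theorem A_phase2 (res : List (PySem.Set Int)) (d : PySem.Dict Int (List String)) :
    res.foldl
        (fun s grp => grp.foldl (fun s ind => (s.1.modify ind [] (fun l => l ++ ["under"]), s.2 + 1)) s)
        (d, (0 : Int))
      = (mark d res.flatten, (res.flatten.length : Int)) := by
  rw [← List.foldl_flatten,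
      PySem.List.foldl_prod_mk (fun (t : PySem.Dict Int (List String)) k =>
        t.modify k [] (fun l => l ++ ["under"])) (fun (u : Int) (_ : Int) => u + 1),
      foldl_add_one]
  simp [mark]

-- ===== the run scan of B =====

-- the keys whose first component occurs more than once in M
def dupKeys (M : List (Int × Int)) : List Int :=
  (M.filter (fun p => 1 < (M.map Prod.fst).count p.1)).map Prod.snd

theorem cont_fold (t : List (Int × Int)) :
    ∀ (v : Int) (du : PySem.Dict Int (List String) × Int) (ks : List Int), ks ≠ [] →
    (∀ q ∈ t, q.1 = v) →
    t.foldl scanStep (du, some v, ks) = (du, some v, ks ++ t.map Prod.snd) := by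
  induction t with
  | nil => intro v du ks _ _; simp
  | cons q t ih =>
      intro v du ks hks hall
      have hq : q.1 = v := hall q (by simp)
      rw [List.foldl_cons, show scanStep (du, some v, ks) q = (du, some v, ks ++ [q.2]) by
        simp [scanStep, hks, hq]]
      rw [ih v du (ks ++ [q.2]) (by simp) (fun r hr => hall r (by simp [hr]))]
      simp

theorem run_fold (run : List (Int × Int)) (v : Int) (du : PySem.Dict Int (List String) × Int)
    (hne : run ≠ []) (hall : ∀ q ∈ run, q.1 = v) :
    run.foldl scanStep (du, none, []) = (du, some v, run.map Prod.snd) := by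
  cases run with
  | nil => exact absurd rfl hne
  | cons q t =>
      have hq : q.1 = v := hall q (by simp)
      rw [List.foldl_cons, show scanStep (du, none, []) q = (du, some v, [q.2]) by
        simp [scanStep, flushRun, hq]]
      rw [cont_fold t v du [q.2] (by simp) (fun r hr => hall r (by simp [hr]))]
      simp

-- the whole of Source B's scan (fold plus trailing flush) marks exactly the duplicated keys
theorem scan_total : ∀ (n : Nat) (M : List (Int × Int)), M.length ≤ n →
    M.Pairwise (fun a b => a.1 ≤ b.1) →
    ∀ (du : PySem.Dict Int (List String) × Int),
    flushRun (M.foldl scanStep (du, none, [])).1 (M.foldl scanStep (du, none, [])).2.2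
      = (mark du.1 (dupKeys M), du.2 + ((dupKeys M).length : Int)) := by
  intro n
  induction n with
  | zero =>
      intro M hlen _ du
      rw [List.length_eq_zero_iff.1 (Nat.le_zero.1 hlen)]
      simp [flushRun, dupKeys, mark]
  | succ n ih =>
      intro M hlen hpw du
      cases hM : M with
      | nil => simp [flushRun, dupKeys, mark]
      | cons p M' =>
          subst hM
          set run := (p :: M').takeWhile (fun q => q.1 == p.1) with hrun
          set rest := (p :: M').dropWhile (fun q => q.1 == p.1) with hrest
          have hsplit : run ++ rest = p :: M' := List.takeWhile_append_dropWhile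
          have hrun_ne : run ≠ [] := by
            rw [hrun]
            simp
          have hall_run : ∀ q ∈ run, q.1 = p.1 := by
            intro q hq
            have := List.mem_takeWhile_imp hq
            simpa using this
          have hrest_sub : rest.Sublist (p :: M') := List.dropWhile_sublist _
          have hrest_pw : rest.Pairwise (fun a b => a.1 ≤ b.1) := hpw.sublist hrest_sub
          have hrest_ne : ∀ q ∈ rest, q.1 ≠ p.1 := by
            cases hr : rest with
            | nil => intro q hq; simp at hq
            | cons w rest' =>
                have hw : ¬(w.1 == p.1) = true := by
                  have := List.head_dropWhile_not (fun q => q.1 == p.1) (l := p :: M')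
                    (by rw [← hrest, hr]; simp)
                  simpa [← hrest, hr] using this
                have hwne : w.1 ≠ p.1 := by simpa using hw
                have hwge : p.1 ≤ w.1 := by
                  have hwmem : w ∈ p :: M' := hrest_sub.subset (by rw [hr]; simp)
                  rcases List.mem_cons.1 hwmem with h | h
                  · rw [h]
                  · exact (List.pairwise_cons.1 hpw).1 w h
                have hwgt : p.1 < w.1 := lt_of_le_of_ne hwge (Ne.symm hwne)
                intro q hq
                rcases List.mem_cons.1 hq with h | h
                · rw [h]; exact hwne
                · have : w.1 ≤ q.1 := by
                    rw [hr] at hrest_pw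
                    exact (List.pairwise_cons.1 hrest_pw).1 q h
                  omega
          -- fold over M = run ++ rest
          have hfold : (p :: M').foldl scanStep (du, none, [])
              = rest.foldl scanStep (du, some p.1, run.map Prod.snd) := by
            rw [← hsplit, List.foldl_append, run_fold run p.1 du hrun_ne hall_run]
          -- counts: the first components of run are all p.1, rest has none
          have hcount_run : (run.map Prod.fst).count p.1 = run.length := by
            rw [List.count_eq_length.2 (by
              intro v hv
              rcases List.mem_map.1 hv with ⟨q, hq, rfl⟩
              exact ((hall_run q hq)).symm), List.length_map]
          have hcount_rest_p : (rest.map Prod.fst).count p.1 = 0 := by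
            rw [List.count_eq_zero]
            intro hmem
            rcases List.mem_map.1 hmem with ⟨q, hq, hq1⟩
            exact hrest_ne q hq hq1
          have hcount_run_q : ∀ q ∈ rest, (run.map Prod.fst).count q.1 = 0 := by
            intro q hq
            rw [List.count_eq_zero]
            intro hmem
            rcases List.mem_map.1 hmem with ⟨r, hr, hr1⟩
            exact hrest_ne q hq (by rw [← hr1, hall_run r hr])
          -- dupKeys splits along the run
          have hdup : dupKeys (p :: M')
              = (if 1 < run.length then run.map Prod.snd else []) ++ dupKeys rest := by
            rw [dupKeys, ← hsplit, List.filter_append, List.map_append]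
            congr 1
            · by_cases hlr : 1 < run.length
              · rw [if_pos hlr, List.filter_eq_self.2 (by
                  intro q hq
                  rw [List.map_append, List.count_append, hall_run q hq, hcount_run, hcount_rest_p]
                  simpa using hlr)]
              · rw [if_neg hlr, List.map_eq_nil_iff, List.filter_eq_nil_iff]
                intro q hq
                rw [List.map_append, List.count_append, hall_run q hq, hcount_run, hcount_rest_p]
                simpa using hlr
            · rw [dupKeys]
              congr 1
              apply List.filter_congr
              intro q hq
              rw [List.map_append, List.count_append, hcount_run_q q hq]
              simp
          -- one step into rest reduces to a fresh scan of rest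
          have hlen_run : 1 ≤ run.length := List.length_pos_of_ne_nil hrun_ne
          have hlen_rest : rest.length ≤ n := by
            have : run.length + rest.length = M'.length + 1 := by
              rw [← List.length_append, hsplit, List.length_cons]
            have hlM : M'.length + 1 ≤ n + 1 := by simpa using hlen
            omega
          have hih := ih rest hlen_rest hrest_pw (flushRun du (run.map Prod.snd))
          have hjoin : flushRun ((p :: M').foldl scanStep (du, none, [])).1
                ((p :: M').foldl scanStep (du, none, [])).2.2
              = flushRun (rest.foldl scanStep (flushRun du (run.map Prod.snd), none, [])).1
                (rest.foldl scanStep (flushRun du (run.map Prod.snd), none, [])).2.2 := by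
            rw [hfold]
            cases hr : rest with
            | nil => simp [flushRun]
            | cons w rest' =>
                have hwne : w.1 ≠ p.1 := hrest_ne w (by rw [hr]; simp)
                have hcond : ¬((run.map Prod.snd ≠ []) ∧ (some p.1 = some w.1)) := by
                  rintro ⟨-, h⟩
                  exact hwne (Option.some.inj h).symm
                rw [List.foldl_cons, List.foldl_cons,
                  show scanStep (du, some p.1, run.map Prod.snd) w
                      = (flushRun du (run.map Prod.snd), some w.1, [w.2]) by
                    simp only [scanStep]
                    rw [if_neg hcond],
                  show scanStep ((flushRun du (run.map Prod.snd)), none, []) w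
                      = (flushRun du (run.map Prod.snd), some w.1, [w.2]) by
                    simp [scanStep, flushRun]]
          rw [hjoin, hih, hdup]
          by_cases hlr : 1 < run.length
          · rw [if_pos hlr,
              show flushRun du (run.map Prod.snd)
                  = (mark du.1 (run.map Prod.snd), du.2 + (run.length : Int)) by
                simp [flushRun, hlr, mark]]
            rw [mark_append]
            simp only [Prod.mk.injEq, List.length_append, List.length_map]
            refine ⟨by trivial, by push_cast; ring⟩
          · rw [if_neg hlr,
              show flushRun du (run.map Prod.snd) = du by
                simp [flushRun, hlr]]
            simp

-- duplicated-keys extraction is invariant under permutation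
theorem dup_perm {M M' : List (Int × Int)} (h : M.Perm M') :
    (dupKeys M).Perm (dupKeys M') := by
  have hcnt : ∀ v, (M.map Prod.fst).count v = (M'.map Prod.fst).count v :=
    fun v => (h.map Prod.fst).count_eq v
  have : M.filter (fun p => 1 < (M.map Prod.fst).count p.1)
      = M.filter (fun p => 1 < (M'.map Prod.fst).count p.1) := by
    apply List.filter_congr
    intro p _
    rw [hcnt p.1]
  rw [dupKeys, dupKeys, this]
  exact (h.filter _).map _

-- B's duplicated keys of the swapped singletons are exactly A's count-filtered keys
theorem dup_swap (L : List (Int × Int)) :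
    dupKeys (L.map (fun q => (q.2, q.1)))
      = (L.filter (fun p => 1 < (L.map Prod.snd).count p.2)).map Prod.fst := by
  rw [dupKeys, List.filter_map, List.map_map]
  have hfst : (L.map (fun q : Int × Int => (q.2, q.1))).map Prod.fst = L.map Prod.snd := by
    rw [List.map_map]; rfl
  rw [hfst]
  rfl

-- the main equivalence
theorem fou_eq_alt (dr : List (Int × List Int)) (data : List (Int × List String))
    (hpre : Pre_find_over_under dr data) :
    find_over_under dr data = find_over_under_alt dr data := by
  obtain ⟨hdr, hdata, hkey⟩ := hpre
  unfold find_over_under find_over_under_alt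
  rw [pass1A_split, pass1B_split]
  dsimp only
  have hitems : (List.foldl lstep PySem.Dict.empty dr).items = singEntries dr := by
    have := labels_items_aux dr PySem.Dict.empty (by simpa [PySem.Dict.keys_empty] using hdr)
    simpa using this
  have hsingles : List.foldl sstep [] dr = (singEntries dr).map (fun q => (q.2, q.1)) := by
    simpa using singles_fold dr []
  set L := singEntries dr with hL
  -- the singleton-labels list has distinct keys
  have hLnodup : (L.map Prod.fst).Nodup := by
    have hsub : ((dr.filter (fun p => p.2.length = 1)).map Prod.fst).Nodup :=
      (List.filter_sublist.map Prod.fst).nodup hdr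
    simpa [hL, singEntries, List.map_map, Function.comp] using hsub
  -- the data dict after the "over" pass: same keys as data
  have hd1 : List.foldl dstep (PySem.Dict.mk data) dr
      = ((dr.filter (fun p => p.2.length > 1)).map Prod.fst).foldl
          (fun d k => d.modify k [] (fun l => l ++ ["over"])) (PySem.Dict.mk data) :=
    foldl_if_filter (fun p : Int × List Int => p.2.length > 1) Prod.fst
      (fun (d : PySem.Dict Int (List String)) k => d.modify k [] (fun l => l ++ ["over"]))
      dr (PySem.Dict.mk data)
  have hd1keys : (List.foldl dstep (PySem.Dict.mk data) dr).keys = data.map Prod.fst := by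
    rw [hd1, PySem.Dict.keys_foldl_modify _ ([] : List String) (fun _ _ => fun l => l ++ ["over"]) _]
    exact update_self _ _ (by
      intro k hk
      rcases List.mem_map.1 hk with ⟨p, hp, rfl⟩
      rcases List.mem_filter.1 hp with ⟨hpL, hpc⟩
      exact hkey p hpL (Or.inl (by simpa using hpc)))
  have hd1nodup : (List.foldl dstep (PySem.Dict.mk data) dr).keys.Nodup := by
    rw [hd1keys]; exact hdata
  set d1 := List.foldl dstep (PySem.Dict.mk data) dr with hd1def
  -- A's side: marking fold over the flattened filtered groups
  rw [hitems,
    show (fun (dn : PySem.Dict Int (PySem.Set Int)) (p : Int × Int) =>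
      dn.modify p.2 [] fun s => PySem.Set.add s p.1) = gstep from rfl,
    A_phase2]
  set KA := ((L.foldl gstep PySem.Dict.empty).values.filter (fun s => PySem.Set.len s > 1)).flatten
    with hKA
  -- B's side: scan over the sorted singletons
  rw [hsingles]
  set M := PySem.List.sorted (L.map (fun q => (q.2, q.1))) (fun p => p.1) false with hM
  have hMpw : M.Pairwise (fun a b => a.1 ≤ b.1) := PySem.List.sorted_pairwise _ _
  rw [scan_total M.length M (le_refl _) hMpw (d1, (0 : Int))]
  -- the two key lists are permutations of each other
  have hperm : KA.Perm (dupKeys M) := by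
    have h1 := KA_perm_KB L hLnodup
    have h2 : (dupKeys (L.map (fun q => (q.2, q.1)))).Perm (dupKeys M) :=
      dup_perm (PySem.List.sorted_perm _ _ _).symm
    rw [dup_swap] at h2
    exact h1.trans h2
  have hKAsub : ∀ k ∈ KA, k ∈ d1.keys := by
    intro k hk
    have hk' : k ∈ (L.filter (fun p => 1 < (L.map Prod.snd).count p.2)).map Prod.fst :=
      (KA_perm_KB L hLnodup).mem_iff.1 hk
    rcases List.mem_map.1 hk' with ⟨p, hp, rfl⟩
    rcases List.mem_filter.1 hp with ⟨hpL, hpc⟩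
    rw [hd1def, hd1keys]
    rcases List.mem_map.1 (by rw [hL, singEntries] at hpL; exact hpL) with ⟨q, hq, hq'⟩
    rcases List.mem_filter.1 hq with ⟨hqL, hq1⟩
    have hq1' : q.2.length = 1 := by simpa using hq1
    have hqp : q.1 = p.1 ∧ PySem.List.pyGetD q.2 0 0 = p.2 := by
      constructor <;> [exact congrArg Prod.fst hq'; exact congrArg Prod.snd hq']
    have hcnt : 1 < ((dr.filter (fun r => r.2.length = 1)).map
        (fun r => PySem.List.pyGetD r.2 0 0)).count (PySem.List.pyGetD q.2 0 0) := by
      have : (L.map Prod.snd)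
          = (dr.filter (fun r => r.2.length = 1)).map (fun r => PySem.List.pyGetD r.2 0 0) := by
        simp [hL, singEntries, List.map_map, Function.comp]
      rw [← this, hqp.2]
      simpa using hpc
    rw [← hqp.1]
    exact hkey q hqL (Or.inr ⟨hq1', hcnt⟩)
  have hmark : mark d1 KA = mark d1 (dupKeys M) := mark_eq_of_perm d1 hperm hKAsub hd1nodup
  rw [hmark, hperm.length_eq]
  simp

-- ===== VERDICT (by name: the statement is the Claim_ definition above) =====
theorem find_over_under_spec : Claim_equal_find_over_under := by
  intro dict_result data _ hpre
  unfold Spec_find_over_under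
  exact fou_eq_alt dict_result data hpre
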